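-- pv_equiv track=rewrite | github.com/mardini2/Cross-World-UI-Bridge | app/auth/secrets.py | _validate_token
-- ===== SOURCE A (Python) =====
-- def _validate_token(token: str) -> bool:
--     """Validate token format and structure."""
--     if not token or not isinstance(token, str):
--         return False
--
--     # Check token length and format
--     if len(token) < 32 or len(token) > 64:
--         return False
--
--     # Check for valid base64url characters
--     import string
--     valid_chars = string.ascii_letters + string.digits + '-_'
--     return all(c in valid_chars for c in token)
-- ===== SOURCE B (Python) =====
-- import re
--
-- _TOKEN_RE = re.compile(r'\A[A-Za-z0-9_-]{32,64}\Z')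
--
--
-- def _validate_token(token: str) -> bool:
--     """Validate token format and structure (regex single-pass version)."""
--     if not token or not isinstance(token, str):
--         return False
--     return _TOKEN_RE.match(token) is not None
-- ===== Notes on version B (the rewrite author's own statement) =====
-- stated objective: idiomatic
-- what changed: The explicit length comparison plus per-character membership loop over a concatenated alphabet string is replaced by a single precompiled regex (one DFA-style pass folding the {32,64} length bound and the base64url character class together), with the falsy/non-str guard kept.
import Mathlib
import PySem

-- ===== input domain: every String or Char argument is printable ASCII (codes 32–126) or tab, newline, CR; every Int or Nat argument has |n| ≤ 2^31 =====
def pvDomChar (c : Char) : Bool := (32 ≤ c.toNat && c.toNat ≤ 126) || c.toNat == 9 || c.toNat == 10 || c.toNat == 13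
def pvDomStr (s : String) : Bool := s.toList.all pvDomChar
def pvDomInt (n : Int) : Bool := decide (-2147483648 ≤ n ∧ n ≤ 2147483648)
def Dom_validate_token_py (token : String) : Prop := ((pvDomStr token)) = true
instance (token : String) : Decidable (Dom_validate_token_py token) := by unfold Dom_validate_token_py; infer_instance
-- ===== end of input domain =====

-- B replaces A's explicit length compare + per-character membership loop over a concatenated
-- alphabet string by a single precompiled regex [A-Za-z0-9_-]{32,64}, ported as its DFA:
-- one left fold over the characters tracking the matched-prefix length (idiomatic; not faster).

-- ===== PORT A =====
-- string.ascii_letters + string.digits + '-_'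
def pyValidChars : String :=
  "abcdefghijklmnopqrstuvwxyzABCDEFGHIJKLMNOPQRSTUVWXYZ0123456789-_"

def validate_token_py (token : String) : Bool :=
  if token.toList = [] then false            -- `not token`
  else if token.toList.length < 32 || token.toList.length > 64 then false
  else token.toList.all (fun c => pyValidChars.toList.contains c)   -- all(c in valid_chars …)

-- ===== PORT B =====
-- character class [A-Za-z0-9_-]
def reClassChar (c : Char) : Bool :=
  ('A' ≤ c && c ≤ 'Z') || ('a' ≤ c && c ≤ 'z') || ('0' ≤ c && c ≤ '9') || c == '_' || c == '-'

-- DFA step for [A-Za-z0-9_-]{32,64}: state = number of matched characters (none = dead state)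
def reStep (s : Option Nat) (c : Char) : Option Nat :=
  match s with
  | none => none
  | some n => if reClassChar c then some (n + 1) else none

def validate_token_py_alt (token : String) : Bool :=
  if token.toList = [] then false            -- `not token`
  else
    match token.toList.foldl reStep (some 0) with
    | none => false
    | some n => 32 ≤ n && n ≤ 64             -- accepting states of the {32,64} quantifier

-- ===== PRECONDITION & SPEC =====
def Spec_validate_token_py (token : String) (out : Bool) : Prop := out = validate_token_py_alt token
instance (token : String) (out : Bool) : Decidable (Spec_validate_token_py token out) := by unfold Spec_validate_token_py; infer_instance

-- ===== CLAIM (what is proved, stated in full; the proofs are below) =====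
def Claim_equal_validate_token_py : Prop := ∀ (token : String), Dom_validate_token_py token → Spec_validate_token_py token (validate_token_py token)

-- ===== LEMMAS AND PROOFS =====

-- A's alphabet-membership test coincides with B's character class, for every Char.
theorem mem_iff_class (c : Char) : c ∈ pyValidChars.toList ↔ reClassChar c = true := by
  simp [pyValidChars, reClassChar, Char.ext_iff, Char.le_def, UInt32.le_iff_toNat_le, UInt32.ext_iff]
  omega

theorem contains_eq_class (c : Char) : pyValidChars.toList.contains c = reClassChar c := by
  rcases Bool.eq_false_or_eq_true (reClassChar c) with h | h <;>
    simp [h] <;> simp [mem_iff_class, h]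

theorem foldl_reStep_none (l : List Char) : l.foldl reStep none = none := by
  induction l with
  | nil => rfl
  | cons d u ihu => simpa [reStep] using ihu

-- The DFA fold computes: all chars in class → matched length, else dead state.
theorem foldl_reStep (l : List Char) (n : Nat) :
    l.foldl reStep (some n) =
      if l.all reClassChar then some (n + l.length) else none := by
  induction l generalizing n with
  | nil => simp
  | cons c t ih =>
      by_cases h : reClassChar c = true
      · simp [reStep, h, ih, Nat.add_assoc, Nat.add_comm 1 t.length]
      · simp [reStep, h, foldl_reStep_none, List.all_cons]

-- ===== VERDICT (by name: the statement is the Claim_ definition above) =====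
theorem validate_token_py_spec : Claim_equal_validate_token_py := by
  intro token _
  unfold Spec_validate_token_py validate_token_py validate_token_py_alt
  by_cases hnil : token.toList = []
  · simp [hnil]
  · simp only [hnil, if_false]
    rw [foldl_reStep]
    have hall : token.toList.all (fun c => pyValidChars.toList.contains c)
        = token.toList.all reClassChar := by
      simp only [contains_eq_class]
    rw [hall]
    by_cases ha : token.toList.all reClassChar = true
    · simp only [ha, if_true]
      by_cases hlen : token.toList.length < 32 ∨ token.toList.length > 64
      · simp_all
        omega
      · simp_all
    · simp [ha]
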